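-- pv_equiv track=rewrite | github.com/ZhangTerrence/CS115 | Lab/Lab 10 Files/Lab10.py | innerCells
-- ===== SOURCE A (Python) =====
-- def createOneRow(width):
--     """Returns one row of zeros of width "width"  You should use this in your createBoard(width, height) function"""
--     row = []
--     for col in range(width):
--         row += [0]
--     return row
--
-- def createBoard(width, height):
--     """Returns a 2d array with "height" rows and "width" cols"""
--     A = []
--     for row in range(height):
--         A += [createOneRow(width)]
--     return A
--
-- def innerCells(w, h):
--     """Creates an empty board and then modifies it so that all cells that are not on the border are "on" cells"""
--     A = createBoard(w, h)
--     for row in range(h):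
--         for col in range(w):
--             if row == 0 or col == 0 or row == h - 1 or col == w - 1:
--                 A[row][col] = 0
--             else:
--                 A[row][col] = 1
--     return A
-- ===== SOURCE B (Python) =====
-- def innerCells(w, h):
--     def row(r):
--         if r == 0 or r == h - 1 or w < 2:
--             return [0] * w
--         return [0] + [1] * (w - 2) + [0]
--     return [row(r) for r in range(h)]
-- ===== Notes on version B (the rewrite author's own statement) =====
-- stated objective: alternative
-- what changed: B never builds or mutates a zero board: each row is constructed directly by concatenation ([0] + [1]*(w-2) + [0] for interior rows, [0]*w for border rows), replacing A's build-then-overwrite per-cell double loop with a pure per-row constructor; list repetition/concatenation runs in C, avoiding the per-cell Python branch and assignment.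
import Mathlib
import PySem

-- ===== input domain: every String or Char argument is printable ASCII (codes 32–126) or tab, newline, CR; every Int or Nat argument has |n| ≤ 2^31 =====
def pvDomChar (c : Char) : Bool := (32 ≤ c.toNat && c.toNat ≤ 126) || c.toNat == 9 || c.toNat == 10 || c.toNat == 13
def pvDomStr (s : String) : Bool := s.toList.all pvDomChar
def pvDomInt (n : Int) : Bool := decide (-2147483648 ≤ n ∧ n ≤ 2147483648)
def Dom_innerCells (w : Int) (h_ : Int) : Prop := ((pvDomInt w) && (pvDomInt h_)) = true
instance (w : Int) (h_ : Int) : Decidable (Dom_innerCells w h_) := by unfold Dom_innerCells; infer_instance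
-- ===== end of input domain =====

-- B builds each row directly by concatenation (border rows all zeros, interior rows
-- [0] + [1]*(w-2) + [0]); no zero board is built and nothing is mutated (objective: alternative).

-- ===== PORT A =====
-- A[row][col] = v is ported as List.modify/List.set; the loop indices are provably
-- in range (0 ≤ row < h, 0 ≤ col < w), so this is exact (Python never raises here).
def pvCreateOneRow (width : Int) : List Int :=
  (PySem.List.pyRange 0 width 1).foldl (fun row _ => row ++ [(0 : Int)]) []

def pvCreateBoard (width : Int) (height : Int) : List (List Int) :=
  (PySem.List.pyRange 0 height 1).foldl (fun A _ => A ++ [pvCreateOneRow width]) []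

def innerCells (w : Int) (h_ : Int) : List (List Int) :=
  let A := pvCreateBoard w h_
  (PySem.List.pyRange 0 h_ 1).foldl (fun A row =>
    (PySem.List.pyRange 0 w 1).foldl (fun A col =>
      if row = 0 ∨ col = 0 ∨ row = h_ - 1 ∨ col = w - 1 then
        A.modify row.toNat (fun r => r.set col.toNat 0)
      else
        A.modify row.toNat (fun r => r.set col.toNat 1)) A) A

-- ===== PORT B =====
-- [0]*w is List.replicate w.toNat 0 (empty for w ≤ 0, as in Python);
-- [1]*(w-2) is List.replicate (w-2).toNat 1.
def pvRowB (w : Int) (h_ : Int) (r : Int) : List Int :=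
  if r = 0 ∨ r = h_ - 1 ∨ w < 2 then List.replicate w.toNat (0 : Int)
  else [0] ++ List.replicate (w - 2).toNat (1 : Int) ++ [0]

def innerCells_alt (w : Int) (h_ : Int) : List (List Int) :=
  (PySem.List.pyRange 0 h_ 1).map (pvRowB w h_)

-- ===== PRECONDITION & SPEC =====
def Spec_innerCells (w : Int) (h_ : Int) (out : List (List Int)) : Prop := out = innerCells_alt w h_
instance (w : Int) (h_ : Int) (out : List (List Int)) : Decidable (Spec_innerCells w h_ out) := by unfold Spec_innerCells; infer_instance

-- ===== CLAIM (what is proved, stated in full; the proofs are below) =====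
def Claim_equal_innerCells : Prop := ∀ (w : Int) (h_ : Int), Dom_innerCells w h_ → Spec_innerCells w h_ (innerCells w h_)

-- ===== LEMMAS AND PROOFS =====

-- A fold that sets cells (t+0), (t+1), …, (t+n-1) of a row, described cell by cell.
theorem pv_length_foldl_set {α β : Type} (idx : β → Nat) (v : β → α) (l : List β) (r : List α) :
    (l.foldl (fun s k => s.set (idx k) (v k)) r).length = r.length := by
  induction l generalizing r with
  | nil => rfl
  | cons x t ih => simp [List.foldl_cons, ih, List.length_set]

theorem pv_foldl_set_offset {α : Type} (v : Nat → α) (t n : Nat) (r : List α) (j : Nat) :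
    ((List.range n).foldl (fun s k => s.set (t + k) (v k)) r)[j]? =
      if t ≤ j ∧ j < t + n ∧ j < r.length then some (v (j - t)) else r[j]? := by
  induction n with
  | zero =>
    have hc : ¬(t ≤ j ∧ j < t + 0 ∧ j < r.length) := by omega
    rw [List.range_zero, List.foldl_nil, if_neg hc]
  | succ n ih =>
    rw [List.range_succ, List.foldl_append, List.foldl_cons, List.foldl_nil,
      List.getElem?_set, pv_length_foldl_set, ih]
    by_cases hj : t + n = j
    · subst hj
      rw [if_pos rfl]
      by_cases hlen : t + n < r.length
      · have h2 : t ≤ t + n ∧ t + n < t + (n + 1) ∧ t + n < r.length := by omega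
        have h3 : t + n - t = n := by omega
        rw [if_pos hlen, if_pos h2, h3]
      · have h2 : ¬(t ≤ t + n ∧ t + n < t + (n + 1) ∧ t + n < r.length) := by omega
        rw [if_neg hlen, if_neg h2, List.getElem?_eq_none (by omega : r.length ≤ t + n)]
    · rw [if_neg hj]
      split_ifs with h1 h2 <;> first | rfl | omega

-- The same fold over a Python range of Ints (step 1, nonnegative start).
theorem pv_foldl_set_pyRange {α : Type} (v : Int → α) (a b : Int) (ha : 0 ≤ a)
    (r : List α) (j : Nat) :
    ((PySem.List.pyRange a b 1).foldl (fun s c => s.set c.toNat (v c)) r)[j]? =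
      if a ≤ (j : Int) ∧ (j : Int) < b ∧ j < r.length then some (v (j : Int)) else r[j]? := by
  rw [PySem.List.pyRange_one, List.foldl_map]
  have hfun : (fun (s : List α) (k : Nat) => s.set (a + (k : Int)).toNat (v (a + (k : Int))))
      = (fun s k => s.set (a.toNat + k) (v (a + (k : Int)))) := by
    funext s k
    rw [show (a + (k : Int)).toNat = a.toNat + k by omega]
  rw [hfun, pv_foldl_set_offset]
  split_ifs with h1 h2
  · rw [show a + ((j - a.toNat : Nat) : Int) = (j : Int) by omega]
  · omega
  · omega
  · rfl

-- A fold that modifies rows t, t+1, …, t+n-1 of a board, described row by row.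
theorem pv_foldl_modify_offset {α : Type} (f : Nat → α → α) (t n : Nat) (A : List α) (j : Nat) :
    ((List.range n).foldl (fun B k => B.modify (t + k) (f k)) A)[j]? =
      if t ≤ j ∧ j < t + n then f (j - t) <$> A[j]? else A[j]? := by
  induction n with
  | zero =>
    have hc : ¬(t ≤ j ∧ j < t + 0) := by omega
    rw [List.range_zero, List.foldl_nil, if_neg hc]
  | succ n ih =>
    rw [List.range_succ, List.foldl_append, List.foldl_cons, List.foldl_nil,
      List.getElem?_modify, ih]
    by_cases hj : t + n = j
    · subst hj
      have h2 : t ≤ t + n ∧ t + n < t + (n + 1) := by omega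
      have h3 : t + n - t = n := by omega
      simp [h2, h3]
    · simp only [hj, if_false]
      split_ifs with h1 h2
      · cases A[j]? <;> simp
      · omega
      · omega
      · cases A[j]? <;> simp

theorem pv_foldl_modify_pyRange {α : Type} (f : Int → α → α) (a b : Int) (ha : 0 ≤ a)
    (A : List α) (j : Nat) :
    ((PySem.List.pyRange a b 1).foldl (fun B r => B.modify r.toNat (f r)) A)[j]? =
      if a ≤ (j : Int) ∧ (j : Int) < b then f (j : Int) <$> A[j]? else A[j]? := by
  rw [PySem.List.pyRange_one, List.foldl_map]
  have hfun : (fun (B : List α) (k : Nat) => B.modify (a + (k : Int)).toNat (f (a + (k : Int))))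
      = (fun B k => B.modify (a.toNat + k) (f (a + (k : Int)))) := by
    funext B k
    rw [show (a + (k : Int)).toNat = a.toNat + k by omega]
  rw [hfun, pv_foldl_modify_offset]
  split_ifs with h1 h2
  · rw [show a + ((j - a.toNat : Nat) : Int) = (j : Int) by omega]
  · omega
  · omega
  · rfl

-- A fold of cell-writes on one fixed row is a single modify of that row.
theorem pv_foldl_modify_same {α β : Type} (i : Nat) (step : α → β → α) (l : List β) (A : List α) :
    l.foldl (fun B x => B.modify i (fun r => step r x)) A
      = A.modify i (fun r => l.foldl step r) := by
  induction l generalizing A with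
  | nil => exact (List.modify_id i A).symm
  | cons x t ih =>
    rw [List.foldl_cons, ih, List.modify_modify_eq]
    rfl

-- A's starting board is h.toNat copies of the all-zero row of length w.toNat.
theorem pv_row0 (w : Int) : pvCreateOneRow w = List.replicate w.toNat (0 : Int) := by
  unfold pvCreateOneRow
  rw [PySem.List.foldl_append_singleton_eq_map (f := fun _ => (0 : Int))]
  rw [List.map_const', PySem.List.length_pyRange_one]
  simp

theorem pv_boardA (w h_ : Int) :
    pvCreateBoard w h_ = List.replicate h_.toNat (List.replicate w.toNat (0 : Int)) := by
  unfold pvCreateBoard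
  rw [PySem.List.foldl_append_singleton_eq_map (f := fun _ => pvCreateOneRow w)]
  rw [List.map_const', PySem.List.length_pyRange_one, pv_row0]
  simp

-- Row-level description of port A: the outer loop is a modify of each row.
theorem pv_innerCells_eq (w h_ : Int) :
    innerCells w h_ =
      (PySem.List.pyRange 0 h_ 1).foldl (fun B row =>
        B.modify row.toNat (fun r =>
          (PySem.List.pyRange 0 w 1).foldl (fun r col =>
            r.set col.toNat
              (if row = 0 ∨ col = 0 ∨ row = h_ - 1 ∨ col = w - 1 then 0 else 1)) r))
        (List.replicate h_.toNat (List.replicate w.toNat (0 : Int))) := by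
  unfold innerCells
  rw [pv_boardA]
  refine PySem.List.foldl_congr_mem _ _ _ _ (fun B row hrow => ?_)
  have hstep : (fun (A : List (List Int)) (col : Int) =>
      if row = 0 ∨ col = 0 ∨ row = h_ - 1 ∨ col = w - 1 then
        A.modify row.toNat (fun r => r.set col.toNat 0)
      else
        A.modify row.toNat (fun r => r.set col.toNat 1))
      = (fun A col => A.modify row.toNat (fun r =>
          r.set col.toNat (if row = 0 ∨ col = 0 ∨ row = h_ - 1 ∨ col = w - 1 then 0 else 1))) := by
    funext A col
    by_cases hc : row = 0 ∨ col = 0 ∨ row = h_ - 1 ∨ col = w - 1 <;> simp [hc]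
  rw [hstep, pv_foldl_modify_same]

-- Cell-level description of B's row constructor.
theorem pv_rowB_get (w h_ r : Int) (j : Nat) :
    (pvRowB w h_ r)[j]? =
      if j < w.toNat then
        some (if r = 0 ∨ (j : Int) = 0 ∨ r = h_ - 1 ∨ (j : Int) = w - 1 then (0 : Int) else 1)
      else none := by
  unfold pvRowB
  by_cases hb : r = 0 ∨ r = h_ - 1 ∨ w < 2
  · rw [if_pos hb, List.getElem?_replicate]
    split_ifs with h1 h2 <;> first | rfl | (exfalso; omega)
  · rw [if_neg hb]
    have hr0 : r ≠ 0 := fun h => hb (Or.inl h)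
    have hrh : r ≠ h_ - 1 := fun h => hb (Or.inr (Or.inl h))
    have hw : 2 ≤ w := by by_contra h; exact hb (Or.inr (Or.inr (by omega)))
    rw [List.append_assoc, List.getElem?_append]
    by_cases hj0 : j < ([(0 : Int)] : List Int).length
    · have hj : j = 0 := by simpa using hj0
      subst hj
      have : (0 : Nat) < w.toNat := by omega
      simp [this]
    · rw [if_neg hj0]
      simp only [List.length_cons, List.length_nil] at hj0 ⊢
      rw [List.getElem?_append, List.length_replicate]
      by_cases hmid : j - 1 < (w - 2).toNat
      · rw [if_pos hmid, List.getElem?_replicate, if_pos hmid]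
        have hc : ¬(r = 0 ∨ (j : Int) = 0 ∨ r = h_ - 1 ∨ (j : Int) = w - 1) := by omega
        rw [if_pos (by omega : j < w.toNat), if_neg hc]
      · rw [if_neg hmid]
        by_cases hlast : j - 1 - (w - 2).toNat = 0
        · have hjw : (j : Int) = w - 1 := by omega
          have hjlt : j < w.toNat := by omega
          simp [hlast, hjlt, hjw]
        · rw [List.getElem?_eq_none (by simp; omega), if_neg (by omega : ¬ j < w.toNat)]

-- ===== VERDICT (by name: the statement is the Claim_ definition above) =====
theorem innerCells_spec : Claim_equal_innerCells := by
  intro w h_ _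
  unfold Spec_innerCells
  rw [pv_innerCells_eq]
  unfold innerCells_alt
  apply List.ext_getElem?
  intro i
  rw [pv_foldl_modify_pyRange _ 0 h_ (by omega), List.getElem?_map,
    PySem.List.getElem?_pyRange_one]
  by_cases hi : i < h_.toNat
  · have hc : (0 : Int) ≤ (i : Int) ∧ (i : Int) < h_ := by omega
    have hk : i < (h_ - 0).toNat := by omega
    rw [if_pos hc, if_pos hk, List.getElem?_replicate, if_pos hi]
    simp only [Option.map_some, Option.map_coe, Option.some.injEq, zero_add]
    apply List.ext_getElem?
    intro j
    rw [pv_foldl_set_pyRange _ 0 w (by omega), pv_rowB_get]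
    simp only [List.length_replicate, List.getElem?_replicate]
    split_ifs with h1 h2 h3 h4 <;> first | rfl | omega
  · have hc : ¬((0 : Int) ≤ (i : Int) ∧ (i : Int) < h_) := by omega
    have hk : ¬ i < (h_ - 0).toNat := by omega
    rw [if_neg hc, if_neg hk, List.getElem?_replicate, if_neg hi]
    rfl
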